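-- pv_equiv track=rewrite | github.com/dkuulis/aoc | 2024/aoc-2024-14.py | has_line
-- ===== SOURCE A (Python) =====
-- def has_line(debug):
--     for line in debug:
--         count = 0
--         for n in line:
--             if n > 0:
--                 count += 1
--                 if count == 5:
--                     return True
--             else:
--                 count = 0
--     return False
-- ===== SOURCE B (Python) =====
-- def has_line(debug):
--     return any(
--         all(n > 0 for n in line[i:i + 5])
--         for line in debug
--         for i in range(len(line) - 4)
--     )
-- ===== Notes on version B (the rewrite author's own statement) =====
-- stated objective: alternative
-- what changed: Replaces A's single-pass running counter with a brute-force sliding-window check: enumerate every start index and test whether the 5-element slice starting there is all positive.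
import Mathlib
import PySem

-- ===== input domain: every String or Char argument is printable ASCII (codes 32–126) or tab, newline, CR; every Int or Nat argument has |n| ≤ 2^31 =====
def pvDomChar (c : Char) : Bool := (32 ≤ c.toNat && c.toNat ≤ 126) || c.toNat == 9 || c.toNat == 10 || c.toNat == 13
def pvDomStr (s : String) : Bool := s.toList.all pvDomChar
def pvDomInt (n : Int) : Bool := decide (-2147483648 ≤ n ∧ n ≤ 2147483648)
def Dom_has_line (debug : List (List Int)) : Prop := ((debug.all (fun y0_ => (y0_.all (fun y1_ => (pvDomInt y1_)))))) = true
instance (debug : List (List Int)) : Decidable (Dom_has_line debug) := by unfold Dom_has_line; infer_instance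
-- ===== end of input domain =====

-- B replaces A's running counter with a brute-force sliding-window check
-- (every start index, test the 5-slice for all-positive): an alternative decomposition.


-- ===== PORT A =====
-- inner loop of A: running counter, returns True as soon as count reaches 5
def hasLineRow (line : List Int) (count : Nat) : Bool :=
  match line with
  | [] => false
  | n :: rest =>
    if n > 0 then
      if count + 1 == 5 then true else hasLineRow rest (count + 1)
    else
      hasLineRow rest 0

def has_line (debug : List (List Int)) : Bool :=
  match debug with
  | [] => false
  | line :: rest => if hasLineRow line 0 then true else has_line rest

-- ===== PORT B =====
-- any(all(n > 0 for n in line[i:i+5]) for line in debug for i in range(len(line)-4))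
def has_line_alt (debug : List (List Int)) : Bool :=
  debug.any (fun line =>
    (PySem.List.pyRange 0 ((line.length : Int) - 4) 1).any (fun i =>
      (PySem.List.slice line (some i) (some (i + 5))).all (fun n => decide (n > 0))))

-- ===== PRECONDITION & SPEC =====
def Spec_has_line (debug : List (List Int)) (out : Bool) : Prop := out = has_line_alt debug
instance (debug : List (List Int)) (out : Bool) : Decidable (Spec_has_line debug out) := by unfold Spec_has_line; infer_instance

-- ===== CLAIM (what is proved, stated in full; the proofs are below) =====
def Claim_equal_has_line : Prop := ∀ (debug : List (List Int)), Dom_has_line debug → Spec_has_line debug (has_line debug)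

-- ===== LEMMAS AND PROOFS =====

-- window search: some 5-window of l is all positive (Nat-indexed normal form of B's row test)
def Wb (l : List Int) : Bool :=
  (List.range (l.length - 4)).any (fun i => ((l.drop i).take 5).all (fun n => decide (n > 0)))

-- the first k elements exist and are all positive
def prefixPos (l : List Int) (k : Nat) : Bool :=
  decide (k ≤ l.length) && (l.take k).all (fun n => decide (n > 0))

theorem prefixPos_mono (l : List Int) (a b : Nat) (hab : a ≤ b)
    (h : prefixPos l b = true) : prefixPos l a = true := by
  simp only [prefixPos, Bool.and_eq_true, decide_eq_true_eq, List.all_eq_true] at *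
  refine ⟨by omega, fun x hx => ?_⟩
  have heq : l.take a = (l.take b).take a := by
    rw [List.take_take]
    congr 1
    omega
  rw [heq] at hx
  exact h.2 x (List.take_subset _ _ hx)

theorem P5_W (l : List Int) (h : prefixPos l 5 = true) : Wb l = true := by
  simp only [prefixPos, Bool.and_eq_true, decide_eq_true_eq] at h
  simp only [Wb, List.any_eq_true]
  exact ⟨0, by simp [List.mem_range]; omega, by simpa using h.2⟩

theorem W_cons (x : Int) (xs : List Int) :
    Wb (x :: xs) = (prefixPos (x :: xs) 5 || Wb xs) := by
  by_cases h : 4 ≤ xs.length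
  · have hlen : (x :: xs).length - 4 = (xs.length - 4) + 1 := by
      simp [List.length_cons]; omega
    rw [Wb, hlen, List.range_succ_eq_map]
    simp only [List.any_cons, List.any_map, Function.comp_def, List.drop_succ_cons,
      List.drop_zero]
    have h5 : prefixPos (x :: xs) 5 = ((x :: xs).take 5).all (fun n => decide (n > 0)) := by
      simp [prefixPos]; omega
    rw [h5, Wb]
  · have h1 : (x :: xs).length - 4 = 0 := by simp [List.length_cons]; omega
    have h2 : xs.length - 4 = 0 := by omega
    have h3 : prefixPos (x :: xs) 5 = false := by
      simp only [prefixPos, List.length_cons]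
      have : ¬ (5 ≤ xs.length + 1) := by omega
      simp [this]
    have hw1 : Wb (x :: xs) = false := by unfold Wb; rw [h1]; rfl
    have hw2 : Wb xs = false := by unfold Wb; rw [h2]; rfl
    rw [hw1, hw2, h3]
    rfl

theorem hasLineRow_eq (l : List Int) : ∀ (count : Nat), count < 5 →
    hasLineRow l count = (prefixPos l (5 - count) || Wb l) := by
  induction l with
  | nil =>
    intro count hc
    have : ¬ (5 - count ≤ 0) := by omega
    simp [hasLineRow, prefixPos, Wb, this]
  | cons x xs ih =>
    intro count hc
    by_cases hx : x > 0
    · by_cases h5 : count + 1 = 5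
      · have hk : 5 - count = 1 := by omega
        simp [hasLineRow, hx, h5, hk, prefixPos]
      · have hrec : hasLineRow (x :: xs) count = hasLineRow xs (count + 1) := by
          have h4 : count ≠ 4 := by omega
          simp [hasLineRow, hx, h4]
        rw [hrec, ih (count + 1) (by omega), W_cons]
        have hpre : prefixPos (x :: xs) (5 - count) = prefixPos xs (4 - count) := by
          have hk : 5 - count = (4 - count) + 1 := by omega
          rw [hk]
          simp [prefixPos, List.take_succ_cons, hx]
        have hkc : 5 - (count + 1) = 4 - count := by omega
        rw [hkc, hpre]
        cases hp5 : prefixPos (x :: xs) 5 with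
        | false => simp
        | true =>
          have := prefixPos_mono (x :: xs) (5 - count) 5 (by omega) hp5
          rw [hpre] at this
          simp [this]
    · have hrec : hasLineRow (x :: xs) count = hasLineRow xs 0 := by
        simp [hasLineRow, hx]
      rw [hrec, ih 0 (by omega), W_cons]
      have hxs : prefixPos (x :: xs) (5 - count) = false := by
        have hk : 5 - count = (4 - count) + 1 := by omega
        rw [hk]; simp [prefixPos, List.take_succ_cons, hx]
      have hxs5 : prefixPos (x :: xs) 5 = false := by
        simp [prefixPos, List.take_succ_cons, hx]
      rw [hxs, hxs5]
      cases hp : prefixPos xs 5 with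
      | false => simp
      | true => simp [P5_W xs hp]

theorem hasLineRow_zero (l : List Int) : hasLineRow l 0 = Wb l := by
  rw [hasLineRow_eq l 0 (by omega)]
  cases hp : prefixPos l 5 with
  | false => simp
  | true => simp [P5_W l hp]

-- B's row test normalises to Wb
theorem alt_row (l : List Int) :
    ((PySem.List.pyRange 0 ((l.length : Int) - 4) 1).any (fun i =>
      (PySem.List.slice l (some i) (some (i + 5))).all (fun n => decide (n > 0)))) = Wb l := by
  rw [PySem.List.pyRange_one]
  have hn : (((l.length : Int) - 4) - 0).toNat = l.length - 4 := by omega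
  rw [hn, List.any_map]
  unfold Wb
  have hf : ((fun i => (PySem.List.slice l (some i) (some (i + 5))).all
        (fun n => decide (n > 0))) ∘ (fun k : Nat => (0 : Int) + (k : Int)))
      = (fun i : Nat => ((l.drop i).take 5).all (fun n => decide (n > 0))) := by
    funext k
    have hz : (0 : Int) + (k : Int) = (k : Int) := by ring
    simp only [Function.comp_def, hz]
    have h5 : ((k : Int) + 5) = ((k : Int) + ((5 : Nat) : Int)) := by norm_num
    rw [h5, PySem.List.slice_natCast_add]
  rw [hf]

theorem has_line_eq (debug : List (List Int)) :
    has_line debug = debug.any (fun l => Wb l) := by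
  induction debug with
  | nil => rfl
  | cons line rest ih =>
    show (if hasLineRow line 0 then true else has_line rest) = _
    rw [hasLineRow_zero, List.any_cons, ih]
    cases h : Wb line <;> simp

-- ===== VERDICT (by name: the statement is the Claim_ definition above) =====
theorem has_line_spec : Claim_equal_has_line := by
  intro debug _
  show has_line debug = has_line_alt debug
  rw [has_line_eq]
  simp only [has_line_alt, alt_row]
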